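-- pv_equiv track=rewrite | github.com/emcannaert/SuuToChiChi-analysis-software | postprocess/old/create_masked_superbin_groups.py | get_masked_groups
-- ===== SOURCE A (Python) =====
-- def get_masked_groups(groups, mask):
--     mask_sorted = sorted(mask)
--     removed_so_far = 0
--
--     for m in mask_sorted:
--         effective = m - removed_so_far
--         new_groups = []
--         for g in groups:
--             new_g = []
--             for idx in g:
--                 if idx == effective:
--                     # drop this bin
--                     continue
--                 elif idx > effective:
--                     new_g.append(idx - 1)
--                 else:
--                     new_g.append(idx)
--             if new_g:
--                 new_groups.append(new_g)
--         groups = new_groups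
--         removed_so_far += 1
--     return groups
-- ===== SOURCE B (Python) =====
-- def _count_less(rs, x):
--     """Number of elements of the sorted list rs that are < x (hand-written bisect_left)."""
--     lo = 0
--     hi = len(rs)
--     while lo < hi:
--         mid = (lo + hi) // 2
--         if rs[mid] < x:
--             lo = mid + 1
--         else:
--             hi = mid
--     return lo
--
--
-- def _count_le(rs, x):
--     """Number of elements of the sorted list rs that are <= x."""
--     return _count_less(rs, x + 1)
--
--
-- def _shift_up(e, rs):
--     """Translate a post-removal index e back to the original coordinate:
--     the unique o not in rs with e = o - #(r in rs : r < o), found by binary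
--     search for the first j with _count_le(rs, e + j) <= j (rs sorted, distinct)."""
--     lo = 0
--     hi = len(rs)
--     while lo < hi:
--         mid = (lo + hi) // 2
--         if _count_le(rs, e + mid) <= mid:
--             hi = mid
--         else:
--             lo = mid + 1
--     return e + lo
--
--
-- def get_masked_groups(groups, mask):
--     if not mask:
--         return groups
--     # Translate every mask entry into the original index it removes, once.
--     removed = []
--     for m in sorted(mask):
--         o = _shift_up(m - len(removed), removed)
--         removed.insert(_count_less(removed, o), o)
--     # One pass over all groups: drop removed bins, renumber by count of removed below.
--     out = []
--     for g in groups: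
--         new_g = []
--         for idx in g:
--             c = _count_less(removed, idx)
--             if c < len(removed) and removed[c] == idx:
--                 continue
--             new_g.append(idx - c)
--         if new_g:
--             out.append(new_g)
--     return out
-- ===== Notes on version B (the rewrite author's own statement) =====
-- stated objective: faster
-- what changed: Instead of rebuilding every group once per sorted-mask entry, B first translates the sorted mask into the sorted set of removed original indices, then makes a single pass over the groups, dropping removed bins and renumbering each kept bin by a hand-written binary search over that set.
import Mathlib
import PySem

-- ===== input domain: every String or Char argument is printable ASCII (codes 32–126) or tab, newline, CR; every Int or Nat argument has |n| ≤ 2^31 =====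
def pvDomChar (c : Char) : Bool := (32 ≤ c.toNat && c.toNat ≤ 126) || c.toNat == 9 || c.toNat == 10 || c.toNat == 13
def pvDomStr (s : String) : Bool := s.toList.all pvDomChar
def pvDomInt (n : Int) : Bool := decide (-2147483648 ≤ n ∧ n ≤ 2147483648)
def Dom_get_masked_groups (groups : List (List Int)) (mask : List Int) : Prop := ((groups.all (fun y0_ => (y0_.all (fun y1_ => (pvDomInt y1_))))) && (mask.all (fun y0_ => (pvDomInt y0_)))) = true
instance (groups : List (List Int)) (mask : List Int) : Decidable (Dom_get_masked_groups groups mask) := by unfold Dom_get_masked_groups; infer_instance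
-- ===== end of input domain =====

-- B removes the mask entries in ONE pass over the groups (after translating the sorted mask into the
-- removed original indices, renumbering by binary search) instead of rebuilding every group per mask entry.

-- ===== PORT A =====
def get_masked_groups (groups : List (List Int)) (mask : List Int) : List (List Int) :=
  let mask_sorted := PySem.List.sorted mask (fun x => x) false
  (mask_sorted.foldl (fun (st : List (List Int) × Int) m =>
      let effective := m - st.2
      let new_groups := st.1.foldl (fun new_groups g =>
          let new_g := g.foldl (fun new_g idx =>
              if idx = effective then new_g
              else if idx > effective then new_g ++ [idx - 1]
              else new_g ++ [idx]) []
          if new_g ≠ [] then new_groups ++ [new_g] else new_groups) []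
      (new_groups, st.2 + 1)) (groups, 0)).1

-- ===== PORT B =====
-- hand-written bisect_left of Source B: number of elements of the sorted list rs that are < x.
-- rs[mid] is read with getD: exact, since the loop keeps mid < hi ≤ len(rs); (lo+hi)//2 on
-- nonnegative ints is Nat division, exact.
def pvCountLessAux (rs : List Int) (x : Int) (lo hi : Nat) : Nat :=
  if _h : lo < hi then
    let mid := (lo + hi) / 2
    if rs.getD mid 0 < x then pvCountLessAux rs x (mid + 1) hi
    else pvCountLessAux rs x lo mid
  else lo
termination_by hi - lo
decreasing_by all_goals omega

def pvCountLess (rs : List Int) (x : Int) : Nat := pvCountLessAux rs x 0 rs.length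

-- _count_le of Source B
def pvCountLE (rs : List Int) (x : Int) : Nat := pvCountLess rs (x + 1)

-- _shift_up of Source B (binary search for the first j with _count_le(rs, e + j) <= j)
def pvShiftUpAux (rs : List Int) (e : Int) (lo hi : Nat) : Nat :=
  if _h : lo < hi then
    let mid := (lo + hi) / 2
    if pvCountLE rs (e + (mid : Int)) ≤ mid then pvShiftUpAux rs e lo mid
    else pvShiftUpAux rs e (mid + 1) hi
  else lo
termination_by hi - lo
decreasing_by all_goals omega

def pvShiftUp (e : Int) (rs : List Int) : Int := e + (pvShiftUpAux rs e 0 rs.length : Int)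

-- Source B's removed.insert(_count_less(removed, o), o)
def pvInsertSorted (rs : List Int) (o : Int) : List Int :=
  PySem.List.insert rs ((pvCountLess rs o : Nat) : Int) o

def get_masked_groups_alt (groups : List (List Int)) (mask : List Int) : List (List Int) :=
  if mask = [] then groups else
  let removed := (PySem.List.sorted mask (fun x => x) false).foldl
      (fun removed m => pvInsertSorted removed (pvShiftUp (m - PySem.List.len removed) removed)) []
  groups.foldl (fun out g =>
      let new_g := g.foldl (fun new_g idx =>
          let c := pvCountLess removed idx
          -- removed[c] read with getD: exact, guarded by c < len(removed) as in Source B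
          if c < removed.length ∧ removed.getD c 0 = idx then new_g
          else new_g ++ [idx - (c : Int)]) []
      if new_g ≠ [] then out ++ [new_g] else out) []

-- ===== PRECONDITION & SPEC =====
def Spec_get_masked_groups (groups : List (List Int)) (mask : List Int) (out : List (List Int)) : Prop := out = get_masked_groups_alt groups mask
instance (groups : List (List Int)) (mask : List Int) (out : List (List Int)) : Decidable (Spec_get_masked_groups groups mask out) := by unfold Spec_get_masked_groups; infer_instance

-- ===== CLAIM (what is proved, stated in full; the proofs are below) =====
def Claim_equal_get_masked_groups : Prop := ∀ (groups : List (List Int)) (mask : List Int), Dom_get_masked_groups groups mask → Spec_get_masked_groups groups mask (get_masked_groups groups mask)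

-- ===== LEMMAS AND PROOFS =====

-- proof-level vocabulary
def fA (e idx : Int) : Option Int :=
  if idx = e then none else if idx > e then some (idx - 1) else some idx

def cntLt (rs : List Int) (x : Int) : Nat := rs.countP (fun r => decide (r < x))

def belem (rs : List Int) (idx : Int) : Option Int :=
  if idx ∈ rs then none else some (idx - (cntLt rs idx : Int))

def applyR (rs : List Int) (G : List (List Int)) : List (List Int) :=
  (G.map (fun g => g.filterMap (belem rs))).filter (fun g => decide (g ≠ []))

def stageApply (e : Int) (G : List (List Int)) : List (List Int) :=
  (G.map (fun g => g.filterMap (fA e))).filter (fun g => decide (g ≠ []))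

def stepB (rs : List Int) (m : Int) : List Int :=
  pvInsertSorted rs (pvShiftUp (m - (rs.length : Int)) rs)

-- binary search correctness
lemma sorted_getD_lt (rs : List Int) (hs : rs.Pairwise (· < ·)) (i j : Nat)
    (hij : i < j) (hj : j < rs.length) : rs.getD i 0 < rs.getD j 0 := by
  rw [List.getD_eq_getElem rs 0 (by omega), List.getD_eq_getElem rs 0 hj]
  exact List.pairwise_iff_getElem.mp hs i j (by omega) hj hij

lemma pvCountLessAux_spec (rs : List Int) (x : Int) (hs : rs.Pairwise (· < ·)) :
    ∀ n lo hi, hi - lo ≤ n → lo ≤ hi → hi ≤ rs.length →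
    (∀ i, i < lo → i < rs.length → rs.getD i 0 < x) →
    (∀ i, hi ≤ i → i < rs.length → ¬ rs.getD i 0 < x) →
    (∀ i, i < pvCountLessAux rs x lo hi → i < rs.length → rs.getD i 0 < x) ∧
    (∀ i, pvCountLessAux rs x lo hi ≤ i → i < rs.length → ¬ rs.getD i 0 < x) ∧
    pvCountLessAux rs x lo hi ≤ rs.length := by
  intro n
  induction n with
  | zero =>
    intro lo hi hn hlh hhl hpre hsuf
    have : ¬ lo < hi := by omega
    rw [pvCountLessAux, dif_neg this]
    exact ⟨fun i hi1 hi2 => hpre i hi1 hi2, fun i hi1 hi2 => hsuf i (by omega) hi2, by omega⟩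
  | succ n ih =>
    intro lo hi hn hlh hhl hpre hsuf
    by_cases hlt : lo < hi
    · rw [pvCountLessAux, dif_pos hlt]
      simp only
      by_cases hmid : rs.getD ((lo + hi) / 2) 0 < x
      · rw [if_pos hmid]
        apply ih ((lo + hi) / 2 + 1) hi (by omega) (by omega) hhl
        · intro i hi1 hi2
          rcases Nat.lt_or_ge i ((lo + hi) / 2) with hc | hc
          · exact lt_trans (sorted_getD_lt rs hs i ((lo+hi)/2) hc (by omega)) hmid
          · have : i = (lo + hi) / 2 := by omega
            rw [this]; exact hmid
        · exact hsuf
      · rw [if_neg hmid]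
        apply ih lo ((lo + hi) / 2) (by omega) (by omega) (by omega) hpre
        intro i hi1 hi2 hcon
        rcases Nat.lt_or_ge ((lo + hi) / 2) i with hc | hc
        · exact hmid (lt_trans (sorted_getD_lt rs hs ((lo+hi)/2) i hc hi2) hcon)
        · have : i = (lo + hi) / 2 := by omega
          rw [this] at hcon; exact hmid hcon
    · rw [pvCountLessAux, dif_neg hlt]
      exact ⟨fun i hi1 hi2 => hpre i (by omega) hi2, fun i hi1 hi2 => hsuf i (by omega) hi2, by omega⟩

lemma pvCountLess_spec (rs : List Int) (x : Int) (hs : rs.Pairwise (· < ·)) :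
    (∀ i, i < pvCountLess rs x → i < rs.length → rs.getD i 0 < x) ∧
    (∀ i, pvCountLess rs x ≤ i → i < rs.length → ¬ rs.getD i 0 < x) ∧
    pvCountLess rs x ≤ rs.length :=
  pvCountLessAux_spec rs x hs rs.length 0 rs.length (by omega) (by omega) (le_refl _)
    (by omega) (fun i h1 h2 => by omega)

lemma pvCountLess_eq_cntLt (rs : List Int) (x : Int) (hs : rs.Pairwise (· < ·)) :
    pvCountLess rs x = cntLt rs x := by
  obtain ⟨hpre, hsuf, hle⟩ := pvCountLess_spec rs x hs
  set c := pvCountLess rs x with hc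
  have hsplit : rs = rs.take c ++ rs.drop c := (List.take_append_drop c rs).symm
  rw [cntLt, hsplit, List.countP_append]
  have h1 : (rs.take c).countP (fun r => decide (r < x)) = (rs.take c).length := by
    rw [List.countP_eq_length]
    intro a ha
    rw [List.mem_iff_getElem] at ha
    obtain ⟨i, hilen, rfl⟩ := ha
    have hi1 : i < c := by
      have := hilen; rw [List.length_take] at this; omega
    have hi2 : i < rs.length := by
      have := hilen; rw [List.length_take] at this; omega
    have := hpre i hi1 hi2
    rw [List.getD_eq_getElem rs 0 hi2] at this
    simp only [List.getElem_take, decide_eq_true_eq]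
    exact this
  have h2 : (rs.drop c).countP (fun r => decide (r < x)) = 0 := by
    rw [List.countP_eq_zero]
    intro a ha
    rw [List.mem_iff_getElem] at ha
    obtain ⟨i, hilen, rfl⟩ := ha
    have hi2 : c + i < rs.length := by
      have := hilen; rw [List.length_drop] at this; omega
    have := hsuf (c + i) (by omega) hi2
    rw [List.getD_eq_getElem rs 0 hi2] at this
    simp only [List.getElem_drop, decide_eq_true_eq]
    exact this
  rw [h1, h2, List.length_take]
  omega

lemma pvCountLess_mem (rs : List Int) (x : Int) (hs : rs.Pairwise (· < ·)) :
    (pvCountLess rs x < rs.length ∧ rs.getD (pvCountLess rs x) 0 = x) ↔ x ∈ rs := by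
  obtain ⟨hpre, hsuf, hle⟩ := pvCountLess_spec rs x hs
  set c := pvCountLess rs x with hc
  constructor
  · rintro ⟨h1, h2⟩
    rw [← h2, List.getD_eq_getElem rs 0 h1]
    exact List.getElem_mem h1
  · intro hm
    rw [List.mem_iff_getElem] at hm
    obtain ⟨i, hilen, rfl⟩ := hm
    have hgd : rs.getD i 0 = rs[i] := List.getD_eq_getElem rs 0 hilen
    have hige : c ≤ i := by
      by_contra hcon
      have := hpre i (by omega) hilen
      rw [hgd] at this
      omega
    have : i = c := by
      by_contra hcon
      have hci : c < i := by omega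
      have hclen : c < rs.length := by omega
      have hlt := sorted_getD_lt rs hs c i hci hilen
      have := hsuf c (le_refl c) hclen
      rw [hgd] at hlt
      omega
    rw [← this]
    exact ⟨hilen, hgd⟩

-- counting with ≤
def cntLE (rs : List Int) (x : Int) : Nat := rs.countP (fun r => decide (r ≤ x))

lemma cntLE_eq_cntLt_succ (rs : List Int) (x : Int) : cntLE rs x = cntLt rs (x + 1) := by
  apply List.countP_congr
  intro r _
  simp only [decide_eq_true_eq]
  omega

lemma pvCountLE_eq (rs : List Int) (x : Int) (hs : rs.Pairwise (· < ·)) :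
    pvCountLE rs x = cntLE rs x := by
  rw [pvCountLE, pvCountLess_eq_cntLt rs (x + 1) hs, cntLE_eq_cntLt_succ]

lemma cntLE_split (rs : List Int) (x : Int) :
    cntLE rs x = cntLt rs x + rs.countP (fun r => decide (r = x)) := by
  induction rs with
  | nil => rfl
  | cons a t ih =>
    simp only [cntLE, cntLt, List.countP_cons] at *
    rw [ih]
    by_cases h1 : a ≤ x <;> by_cases h2 : a < x <;> by_cases h3 : a = x <;>
      simp [h1, h2, h3] <;> omega

lemma countP_eq_le_one (rs : List Int) (x : Int) (hs : rs.Pairwise (· < ·)) :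
    rs.countP (fun r => decide (r = x)) ≤ 1 := by
  induction rs with
  | nil => simp
  | cons a t ih =>
    rcases List.pairwise_cons.mp hs with ⟨ha, ht⟩
    rw [List.countP_cons]
    by_cases h : a = x
    · have hz : t.countP (fun r => decide (r = x)) = 0 := by
        rw [List.countP_eq_zero]
        intro r hr
        have := ha r hr
        simp only [decide_eq_true_eq]
        omega
      simp [hz, h]
    · simp only [decide_eq_true_eq, if_neg h, Nat.add_zero]
      exact ih ht

lemma cntLE_mono (rs : List Int) (x y : Int) (hxy : x ≤ y) : cntLE rs x ≤ cntLE rs y := by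
  apply List.countP_mono_left
  intro r _
  simp only [decide_eq_true_eq]
  omega

lemma cntLE_pred_ge (rs : List Int) (x : Int) (hs : rs.Pairwise (· < ·)) :
    cntLE rs x ≤ cntLE rs (x - 1) + 1 := by
  have h1 : cntLE rs x = cntLt rs x + rs.countP (fun r => decide (r = x)) := cntLE_split rs x
  have h2 : cntLt rs x = cntLE rs (x - 1) := by
    rw [cntLE_eq_cntLt_succ]
    congr 1
    omega
  have h3 := countP_eq_le_one rs x hs
  omega

lemma cntLE_P_mono (rs : List Int) (e : Int) (hs : rs.Pairwise (· < ·)) (i j : Nat) (hij : i ≤ j)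
    (h : cntLE rs (e + (i : Int)) ≤ i) : cntLE rs (e + (j : Int)) ≤ j := by
  induction j with
  | zero =>
    have : i = 0 := by omega
    subst this
    exact h
  | succ j ihj =>
    by_cases hj : i ≤ j
    · have hpj := ihj hj
      have := cntLE_pred_ge rs (e + ((j : Int) + 1)) hs
      have harg : e + ((j : Int) + 1) - 1 = e + (j : Int) := by ring
      rw [harg] at this
      push_cast
      omega
    · have : i = j + 1 := by omega
      subst this
      exact h

lemma pvShiftUpAux_spec (rs : List Int) (e : Int) (hs : rs.Pairwise (· < ·)) :
    ∀ (n lo hi : Nat), hi - lo ≤ n → lo ≤ hi →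
    cntLE rs (e + (hi : Int)) ≤ hi →
    (∀ i, i < lo → ¬ cntLE rs (e + (i : Int)) ≤ i) →
    cntLE rs (e + (pvShiftUpAux rs e lo hi : Int)) ≤ pvShiftUpAux rs e lo hi ∧
    (∀ i, i < pvShiftUpAux rs e lo hi → ¬ cntLE rs (e + (i : Int)) ≤ i) ∧
    pvShiftUpAux rs e lo hi ≤ hi := by
  intro n
  induction n with
  | zero =>
    intro lo hi hn hlh hPhi hpre
    have hnl : ¬ lo < hi := by omega
    rw [pvShiftUpAux, dif_neg hnl]
    have : lo = hi := by omega
    exact ⟨this ▸ hPhi, hpre, by omega⟩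
  | succ n ih =>
    intro lo hi hn hlh hPhi hpre
    by_cases hlt : lo < hi
    · rw [pvShiftUpAux, dif_pos hlt]
      simp only
      by_cases hmid : pvCountLE rs (e + (((lo + hi) / 2 : Nat) : Int)) ≤ (lo + hi) / 2
      · rw [if_pos hmid]
        rw [pvCountLE_eq _ _ hs] at hmid
        obtain ⟨h1, h2, h3⟩ := ih lo ((lo + hi) / 2) (by omega) (by omega) hmid hpre
        exact ⟨h1, h2, by omega⟩
      · rw [if_neg hmid]
        rw [pvCountLE_eq _ _ hs] at hmid
        apply ih ((lo + hi) / 2 + 1) hi (by omega) (by omega) hPhi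
        intro i hi1
        rcases Nat.lt_or_ge i lo with hc | hc
        · exact hpre i hc
        · intro hP
          exact hmid (cntLE_P_mono rs e hs i ((lo + hi) / 2) (by omega) hP)
    · rw [pvShiftUpAux, dif_neg hlt]
      have : lo = hi := by omega
      exact ⟨this ▸ hPhi, hpre, by omega⟩

lemma pvShiftUp_spec (rs : List Int) (e : Int) (h : rs.Pairwise (· < ·)) :
    pvShiftUp e rs ∉ rs ∧ pvShiftUp e rs = e + (cntLt rs (pvShiftUp e rs) : Int) := by
  have hPlen : cntLE rs (e + (rs.length : Int)) ≤ rs.length := by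
    have := List.countP_le_length (l := rs) (p := fun r => decide (r ≤ e + (rs.length : Int)))
    exact this
  obtain ⟨hPc, hpre, hle⟩ := pvShiftUpAux_spec rs e h rs.length 0 rs.length (by omega) (by omega)
    hPlen (fun i hi => by omega)
  set c := pvShiftUpAux rs e 0 rs.length with hc
  have heq : cntLE rs (e + (c : Int)) = c := by
    rcases Nat.eq_zero_or_pos c with hz | hpos
    · rw [hz] at hPc ⊢
      omega
    · have hnp := hpre (c - 1) (by omega)
      have hmono : cntLE rs (e + ((c - 1 : Nat) : Int)) ≤ cntLE rs (e + (c : Int)) := by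
        apply cntLE_mono
        have : ((c - 1 : Nat) : Int) ≤ (c : Int) := by push_cast; omega
        omega
      omega
  have honot : pvShiftUp e rs ∉ rs := by
    intro hmem
    have hone : 0 < rs.countP (fun r => decide (r = pvShiftUp e rs)) := by
      rw [List.countP_pos_iff]
      exact ⟨pvShiftUp e rs, hmem, by simp⟩
    have hsplit := cntLE_split rs (pvShiftUp e rs)
    have hup : pvShiftUp e rs = e + (c : Int) := by rw [pvShiftUp, hc]
    rcases Nat.eq_zero_or_pos c with hz | hpos
    · rw [hz] at heq hup
      rw [hup] at hsplit hone
      simp only [Nat.cast_zero] at heq hsplit hone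
      omega
    · have hnp := hpre (c - 1) (by omega)
      have hlt : cntLt rs (pvShiftUp e rs) = cntLE rs (pvShiftUp e rs - 1) := by
        rw [cntLE_eq_cntLt_succ]
        congr 1
        omega
      have harg : pvShiftUp e rs - 1 = e + ((c - 1 : Nat) : Int) := by
        rw [hup]; push_cast; omega
      rw [hlt, harg] at hsplit
      rw [hup] at hsplit hone
      omega
  constructor
  · exact honot
  · have hz : rs.countP (fun r => decide (r = pvShiftUp e rs)) = 0 := by
      rw [List.countP_eq_zero]
      intro r hr
      simp only [decide_eq_true_eq]
      intro hre
      exact honot (hre ▸ hr)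
    have hsplit := cntLE_split rs (pvShiftUp e rs)
    have hup : pvShiftUp e rs = e + (c : Int) := by rw [pvShiftUp, hc]
    rw [hup] at hsplit ⊢
    rw [hup] at hz
    omega

-- pvInsertSorted facts
lemma pvInsertSorted_eq (rs : List Int) (o : Int) (hs : rs.Pairwise (· < ·)) :
    pvInsertSorted rs o = rs.take (pvCountLess rs o) ++ o :: rs.drop (pvCountLess rs o) := by
  rw [pvInsertSorted]
  exact PySem.List.insert_natCast rs (pvCountLess rs o) o (pvCountLess_spec rs o hs).2.2

lemma pvInsertSorted_perm (rs : List Int) (o : Int) (hs : rs.Pairwise (· < ·)) :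
    (pvInsertSorted rs o).Perm (o :: rs) := by
  rw [pvInsertSorted_eq rs o hs]
  have := List.perm_middle (a := o) (l₁ := rs.take (pvCountLess rs o)) (l₂ := rs.drop (pvCountLess rs o))
  rw [List.take_append_drop] at this
  exact this

lemma mem_pvInsertSorted (rs : List Int) (o x : Int) (hs : rs.Pairwise (· < ·)) :
    x ∈ pvInsertSorted rs o ↔ x = o ∨ x ∈ rs := by
  rw [(pvInsertSorted_perm rs o hs).mem_iff, List.mem_cons]

lemma length_pvInsertSorted (rs : List Int) (o : Int) (hs : rs.Pairwise (· < ·)) :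
    (pvInsertSorted rs o).length = rs.length + 1 := by
  simpa using (pvInsertSorted_perm rs o hs).length_eq

lemma pvInsertSorted_pairwise (rs : List Int) (o : Int)
    (hs : rs.Pairwise (· < ·)) (ho : o ∉ rs) :
    (pvInsertSorted rs o).Pairwise (· < ·) := by
  obtain ⟨hpre, hsuf, hlen⟩ := pvCountLess_spec rs o hs
  set c := pvCountLess rs o with hc
  have htake : ∀ x ∈ rs.take c, x < o := by
    intro x hx
    rw [List.mem_iff_getElem] at hx
    obtain ⟨i, hilen, rfl⟩ := hx
    have hi1 : i < c := by have := hilen; rw [List.length_take] at this; omega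
    have hi2 : i < rs.length := by have := hilen; rw [List.length_take] at this; omega
    have := hpre i hi1 hi2
    rw [List.getD_eq_getElem rs 0 hi2] at this
    simpa [List.getElem_take] using this
  have hdrop : ∀ y ∈ rs.drop c, o < y := by
    intro y hy
    rw [List.mem_iff_getElem] at hy
    obtain ⟨i, hilen, rfl⟩ := hy
    have hi2 : c + i < rs.length := by have := hilen; rw [List.length_drop] at this; omega
    have h1 := hsuf (c + i) (by omega) hi2
    rw [List.getD_eq_getElem rs 0 hi2] at h1
    have hne : rs[c + i] ≠ o := by
      intro he
      exact ho (he ▸ List.getElem_mem hi2)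
    simp only [List.getElem_drop]
    omega
  rw [pvInsertSorted_eq rs o hs]
  rw [List.pairwise_append]
  refine ⟨List.Pairwise.sublist (List.take_sublist c rs) hs, ?_, ?_⟩
  · rw [List.pairwise_cons]
    exact ⟨hdrop, List.Pairwise.sublist (List.drop_sublist c rs) hs⟩
  · intro x hx y hy
    rcases List.mem_cons.mp hy with rfl | hy
    · exact htake x hx
    · exact lt_trans (htake x hx) (hdrop y hy)

-- counting facts
lemma countP_split (l : List Int) (o x : Int) (h : o ≤ x) :
    l.countP (fun r => decide (r < x)) =
      l.countP (fun r => decide (r < o)) + l.countP (fun r => decide (o ≤ r ∧ r < x)) := by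
  induction l with
  | nil => rfl
  | cons a t ih =>
    simp only [List.countP_cons, ih, Bool.decide_and]
    split_ifs <;> simp_all <;> omega

lemma cnt_gap (rs : List Int) (a b : Int) (h : rs.Pairwise (· < ·)) (ha : a ∉ rs) (hab : a < b) :
    (cntLt rs b : Int) - (cntLt rs a : Int) < b - a := by
  have hsplit := countP_split rs a b (le_of_lt hab)
  have hcongr : rs.countP (fun r => decide (a ≤ r ∧ r < b)) = rs.countP (fun r => decide (a < r ∧ r < b)) := by
    apply List.countP_congr
    intro r hr
    have : r ≠ a := fun he => ha (he ▸ hr)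
    simp only [decide_eq_true_eq]
    omega
  set S := rs.filter (fun r => decide (a < r ∧ r < b)) with hS
  have hcount : rs.countP (fun r => decide (a < r ∧ r < b)) = S.length := by
    rw [hS, List.countP_eq_length_filter]
  have hnd : S.Nodup := (List.Pairwise.imp (fun h => ne_of_lt h) h).filter _
  have hsub : S.toFinset ⊆ Finset.Ioo a b := by
    intro y hy
    rw [List.mem_toFinset] at hy
    have := List.of_mem_filter hy
    simp only [decide_eq_true_eq] at this
    exact Finset.mem_Ioo.mpr this
  have hlen : S.length ≤ (Finset.Ioo a b).card := by
    rw [← List.toFinset_card_of_nodup hnd]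
    exact Finset.card_le_card hsub
  have hcard : (Finset.Ioo a b).card = (b - a - 1).toNat := Int.card_Ioo a b
  simp only [cntLt]
  omega

-- the heart: one removal stage on renumbered indices = enlarging the removed set
lemma pointwise_step (rs : List Int) (e idx : Int) (h : rs.Pairwise (· < ·)) :
    (belem rs idx).bind (fA e) = belem (pvInsertSorted rs (pvShiftUp e rs)) idx := by
  obtain ⟨honm, hoeq⟩ := pvShiftUp_spec rs e h
  set o := pvShiftUp e rs with ho
  have hcnt' : cntLt (pvInsertSorted rs o) idx = cntLt rs idx + (if o < idx then 1 else 0) := by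
    simp only [cntLt]
    rw [(pvInsertSorted_perm rs o h).countP_eq, List.countP_cons]
    simp
  by_cases hm : idx ∈ rs
  · have hm' : idx ∈ pvInsertSorted rs o := (mem_pvInsertSorted rs o idx h).mpr (Or.inr hm)
    simp [belem, hm, hm']
  · by_cases hio : idx = o
    · have hm' : idx ∈ pvInsertSorted rs o := (mem_pvInsertSorted rs o idx h).mpr (Or.inl hio)
      have hv : idx - (cntLt rs idx : Int) = e := by rw [hio]; omega
      simp only [belem, if_neg hm, if_pos hm', Option.bind_some]
      rw [hv]
      simp [fA]
    · have hm' : idx ∉ pvInsertSorted rs o := by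
        intro hmm
        rcases (mem_pvInsertSorted rs o idx h).mp hmm with rfl | hx
        · exact hio rfl
        · exact hm hx
      simp only [belem, if_neg hm, if_neg hm', Option.bind_some]
      rcases lt_or_gt_of_ne hio with hlt | hgt
      · have hg := cnt_gap rs idx o h hm hlt
        have hno : ¬ (o < idx) := by omega
        rw [hcnt', if_neg hno]
        simp only [fA, if_neg (by omega : ¬ idx - (cntLt rs idx : Int) = e),
          if_neg (by omega : ¬ idx - (cntLt rs idx : Int) > e), Option.some.injEq]
        push_cast
        omega
      · have hg := cnt_gap rs o idx h honm hgt
        rw [hcnt', if_pos hgt]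
        simp only [fA, if_neg (by omega : ¬ idx - (cntLt rs idx : Int) = e),
          if_pos (by omega : idx - (cntLt rs idx : Int) > e), Option.some.injEq]
        push_cast
        omega

lemma applyR_nil (G : List (List Int)) :
    applyR [] G = G.filter (fun g => decide (g ≠ [])) := by
  have hb : belem [] = some := by
    funext idx
    simp [belem, cntLt]
  simp [applyR, hb]

lemma filter_ne_map_filter (f : List Int → List Int) (hf : f [] = []) (G : List (List Int)) :
    ((G.filter (fun g => decide (g ≠ []))).map f).filter (fun g => decide (g ≠ []))
      = (G.map f).filter (fun g => decide (g ≠ [])) := by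
  induction G with
  | nil => rfl
  | cons g t ih =>
    by_cases hg : g = []
    · subst hg
      rw [List.filter_cons_of_neg (by simp), List.map_cons, hf,
        List.filter_cons_of_neg (by simp), ih]
    · rw [List.filter_cons_of_pos (by simp [hg]), List.map_cons, List.map_cons,
        List.filter_cons, List.filter_cons, ih]

lemma step_eq (rs : List Int) (m : Int) (G : List (List Int)) (h : rs.Pairwise (· < ·)) :
    stageApply (m - (rs.length : Int)) (applyR rs G) = applyR (stepB rs m) G := by
  set e := m - (rs.length : Int) with he
  unfold stageApply applyR
  rw [filter_ne_map_filter _ (by simp) _, List.map_map]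
  congr 1
  apply List.map_congr_left
  intro g _
  show (g.filterMap (belem rs)).filterMap (fA e) = g.filterMap (belem (stepB rs m))
  rw [List.filterMap_filterMap]
  apply List.filterMap_congr
  intro idx _
  exact pointwise_step rs e idx h

-- port A's inner loops
lemma innerA_eq (g : List Int) (e : Int) (acc : List Int) :
    g.foldl (fun new_g idx =>
        if idx = e then new_g
        else if idx > e then new_g ++ [idx - 1]
        else new_g ++ [idx]) acc = acc ++ g.filterMap (fA e) := by
  induction g generalizing acc with
  | nil => simp
  | cons idx t ih =>
    by_cases h1 : idx = e
    · have hfa : fA e idx = none := by simp [fA, h1]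
      rw [List.foldl_cons, if_pos h1, ih, List.filterMap_cons, hfa]
    · by_cases h2 : idx > e
      · have hfa : fA e idx = some (idx - 1) := by simp [fA, h1, h2]
        rw [List.foldl_cons, if_neg h1, if_pos h2, ih, List.filterMap_cons, hfa]
        simp
      · have hfa : fA e idx = some idx := by simp [fA, h1, h2]
        rw [List.foldl_cons, if_neg h1, if_neg h2, ih, List.filterMap_cons, hfa]
        simp

lemma stageA_eq (G : List (List Int)) (e : Int) :
    G.foldl (fun new_groups g =>
        let new_g := g.foldl (fun new_g idx =>
            if idx = e then new_g
            else if idx > e then new_g ++ [idx - 1]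
            else new_g ++ [idx]) []
        if new_g ≠ [] then new_groups ++ [new_g] else new_groups) [] = stageApply e G := by
  have hbody : (fun (new_groups : List (List Int)) (g : List Int) =>
      let new_g := g.foldl (fun new_g idx =>
          if idx = e then new_g
          else if idx > e then new_g ++ [idx - 1]
          else new_g ++ [idx]) []
      if new_g ≠ [] then new_groups ++ [new_g] else new_groups)
      = (fun new_groups g => if g.filterMap (fA e) ≠ [] then new_groups ++ [g.filterMap (fA e)] else new_groups) := by
    funext acc g
    simp only [innerA_eq, List.nil_append]
  rw [hbody, PySem.List.foldl_append_ite (p := fun g : List Int => g.filterMap (fA e) ≠ [])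
    (f := fun g : List Int => g.filterMap (fA e))]
  rw [List.nil_append, stageApply, List.filter_map]
  rfl

lemma stepB_pairwise (rs : List Int) (m : Int) (h : rs.Pairwise (· < ·)) :
    (stepB rs m).Pairwise (· < ·) :=
  pvInsertSorted_pairwise _ _ h (pvShiftUp_spec rs _ h).1

-- the fold over the sorted mask
lemma mainA (ms : List Int) : ∀ (rs : List Int) (G : List (List Int)), rs.Pairwise (· < ·) →
    (ms.foldl (fun (st : List (List Int) × Int) m =>
        (stageApply (m - st.2) st.1, st.2 + 1)) (applyR rs G, (rs.length : Int))).1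
      = applyR (ms.foldl stepB rs) G := by
  induction ms with
  | nil => intro rs G _; rfl
  | cons m t ih =>
    intro rs G hp
    rw [List.foldl_cons, List.foldl_cons]
    have h1 : stageApply (m - (rs.length : Int)) (applyR rs G) = applyR (stepB rs m) G :=
      step_eq rs m G hp
    have h2 : ((rs.length : Int) + 1) = ((stepB rs m).length : Int) := by
      rw [stepB, length_pvInsertSorted _ _ hp]; push_cast; ring
    simp only [h1, h2]
    exact ih (stepB rs m) G (stepB_pairwise rs m hp)

-- port B's inner loops
lemma innerB_eq (rs : List Int) (hs : rs.Pairwise (· < ·)) (g : List Int) (acc : List Int) :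
    g.foldl (fun new_g idx =>
        let c := pvCountLess rs idx
        if c < rs.length ∧ rs.getD c 0 = idx then new_g
        else new_g ++ [idx - (c : Int)]) acc = acc ++ g.filterMap (belem rs) := by
  induction g generalizing acc with
  | nil => simp
  | cons idx t ih =>
    simp only [List.foldl_cons]
    by_cases hm : idx ∈ rs
    · have hcond := (pvCountLess_mem rs idx hs).mpr hm
      have hbe : belem rs idx = none := by simp [belem, hm]
      rw [if_pos hcond, ih, List.filterMap_cons, hbe]
    · have hcond : ¬ (pvCountLess rs idx < rs.length ∧ rs.getD (pvCountLess rs idx) 0 = idx) :=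
        fun hc => hm ((pvCountLess_mem rs idx hs).mp hc)
      have hbe : belem rs idx = some (idx - (cntLt rs idx : Int)) := by simp [belem, hm]
      rw [if_neg hcond, ih, List.filterMap_cons, hbe, pvCountLess_eq_cntLt rs idx hs]
      simp

lemma outerB_eq (rs : List Int) (hs : rs.Pairwise (· < ·)) (G : List (List Int)) :
    G.foldl (fun out g =>
        let new_g := g.foldl (fun new_g idx =>
            let c := pvCountLess rs idx
            if c < rs.length ∧ rs.getD c 0 = idx then new_g
            else new_g ++ [idx - (c : Int)]) []
        if new_g ≠ [] then out ++ [new_g] else out) [] = applyR rs G := by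
  have hbody : (fun (out : List (List Int)) (g : List Int) =>
      let new_g := g.foldl (fun new_g idx =>
          let c := pvCountLess rs idx
          if c < rs.length ∧ rs.getD c 0 = idx then new_g
          else new_g ++ [idx - (c : Int)]) []
      if new_g ≠ [] then out ++ [new_g] else out)
      = (fun out g => if g.filterMap (belem rs) ≠ [] then out ++ [g.filterMap (belem rs)] else out) := by
    funext acc g
    simp only [innerB_eq rs hs, List.nil_append]
  rw [hbody, PySem.List.foldl_append_ite (p := fun g : List Int => g.filterMap (belem rs) ≠ [])
    (f := fun g : List Int => g.filterMap (belem rs))]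
  rw [List.nil_append, applyR, List.filter_map]
  rfl

lemma removed_pairwise (ms : List Int) : ∀ rs : List Int, rs.Pairwise (· < ·) →
    (ms.foldl stepB rs).Pairwise (· < ·) := by
  induction ms with
  | nil => intro rs h; exact h
  | cons m t ih =>
    intro rs h
    rw [List.foldl_cons]
    exact ih (stepB rs m) (stepB_pairwise rs m h)

-- ===== VERDICT (by name: the statement is the Claim_ definition above) =====
theorem get_masked_groups_spec : Claim_equal_get_masked_groups := by
  intro groups mask _dom
  unfold Spec_get_masked_groups
  by_cases hmask : mask = []
  · have hsor : PySem.List.sorted mask (fun x => x) false = [] :=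
      (PySem.List.sorted_eq_nil_iff mask (fun x => x) false).mpr hmask
    rw [get_masked_groups, get_masked_groups_alt]
    rw [if_pos hmask]
    simp only [hsor, List.foldl_nil]
  · have hsor : PySem.List.sorted mask (fun x => x) false ≠ [] :=
      fun hc => hmask ((PySem.List.sorted_eq_nil_iff mask (fun x => x) false).mp hc)
    obtain ⟨m, t, hmt⟩ := List.exists_cons_of_ne_nil hsor
    have hbodyA : (fun (st : List (List Int) × Int) m =>
        let effective := m - st.2
        let new_groups := st.1.foldl (fun new_groups g =>
            let new_g := g.foldl (fun new_g idx =>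
                if idx = effective then new_g
                else if idx > effective then new_g ++ [idx - 1]
                else new_g ++ [idx]) []
            if new_g ≠ [] then new_groups ++ [new_g] else new_groups) []
        (new_groups, st.2 + 1))
        = (fun (st : List (List Int) × Int) m => (stageApply (m - st.2) st.1, st.2 + 1)) := by
      funext st m
      simp only [stageA_eq]
    have hbodyB : (fun (removed : List Int) m =>
        pvInsertSorted removed (pvShiftUp (m - PySem.List.len removed) removed)) = stepB := by
      funext removed m
      simp [stepB, PySem.List.len_eq]
    rw [get_masked_groups, get_masked_groups_alt, if_neg hmask]
    simp only [hbodyA, hbodyB, hmt, List.foldl_cons]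
    have hfirst : stageApply (m - (0:Int)) groups = applyR (stepB [] m) groups := by
      have h0 : stageApply (m - (0:Int)) groups
          = stageApply (m - (([] : List Int).length : Int)) (applyR [] groups) := by
        rw [applyR_nil]
        show stageApply (m - (0:Int)) groups = stageApply (m - (0:Int)) (groups.filter _)
        unfold stageApply
        rw [filter_ne_map_filter _ (by simp)]
      rw [h0, step_eq [] m groups List.Pairwise.nil]
    have hlen1 : ((0:Int) + 1) = (((stepB [] m).length : Nat) : Int) := by
      simp [stepB, pvInsertSorted]
    rw [hfirst, hlen1, mainA t (stepB [] m) groups (stepB_pairwise [] m List.Pairwise.nil)]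
    exact (outerB_eq (t.foldl stepB (stepB [] m))
      (removed_pairwise t (stepB [] m) (stepB_pairwise [] m List.Pairwise.nil)) groups).symm
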